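-- pv_equiv track=rewrite | github.com/TomasT-bit/DBL1 | python/main.py | valid_conversation
-- ===== SOURCE A (Python) =====
-- def valid_conversation(conversation, airline_tweet_ids):
--     """
--     Keeps only airline tweets that have at least one non-airline tweet before and after them.
--     Recursively removes invalid airline tweets until all remaining ones are valid.
--     """
--     n = len(conversation)
--     keep = [True] * n
--     changed = False
--
--     for i, tid in enumerate(conversation):
--         if tid in airline_tweet_ids:
--             has_before = any(conversation[j] not in airline_tweet_ids for j in range(i - 1, -1, -1))
--             has_after = any(conversation[j] not in airline_tweet_ids for j in range(i + 1, n))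
--             if not (has_before and has_after):
--                 keep[i] = False
--                 changed = True
--
--     filtered = [tid for i, tid in enumerate(conversation) if keep[i]]
--
--     if not any(tid in airline_tweet_ids for tid in filtered):
--         return None
--
--     if changed:
--         return valid_conversation(filtered, airline_tweet_ids)
--
--     return filtered
-- ===== SOURCE B (Python) =====
-- def valid_conversation(conversation, airline_tweet_ids):
--     """Single pass: an airline tweet survives iff it lies strictly between the
--     first and last non-airline tweets; no recursion is needed."""
--     air = set(airline_tweet_ids)
--     non = [i for i, t in enumerate(conversation) if t not in air]
--     if not non:
--         return None
--     first, last = non[0], non[-1]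
--     out = [t for i, t in enumerate(conversation)
--            if t not in air or (first < i < last)]
--     if not any(t in air for t in out):
--         return None
--     return out
-- ===== Notes on version B (the rewrite author's own statement) =====
-- stated objective: faster
-- what changed: Replaced the recursive remove-and-retry loop with nested membership scans by a single pass: precompute the first and last non-airline indices (airline ids in a set) and keep an element iff it is non-airline or lies strictly between them; no recursion.
import Mathlib
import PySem

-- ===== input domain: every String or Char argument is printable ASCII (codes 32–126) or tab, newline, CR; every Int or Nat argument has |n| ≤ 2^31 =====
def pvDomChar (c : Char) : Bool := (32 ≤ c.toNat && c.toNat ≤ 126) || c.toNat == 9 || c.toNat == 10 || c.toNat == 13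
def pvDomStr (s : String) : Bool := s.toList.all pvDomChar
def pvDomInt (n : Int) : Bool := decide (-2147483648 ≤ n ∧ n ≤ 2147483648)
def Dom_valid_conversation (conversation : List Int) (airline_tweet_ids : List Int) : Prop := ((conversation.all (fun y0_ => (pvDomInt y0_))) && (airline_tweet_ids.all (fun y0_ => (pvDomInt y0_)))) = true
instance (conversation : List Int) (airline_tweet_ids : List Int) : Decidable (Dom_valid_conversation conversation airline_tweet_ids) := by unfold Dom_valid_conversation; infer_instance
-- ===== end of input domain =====

-- B replaces A's recursive remove-and-retry passes by one pass keyed to the first and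
-- last non-airline positions (objective: faster; see a timing run for the measurement).

-- ===== PORT A =====
-- keep[i], as built by A's for-loop: flipped to False exactly when tid is an airline id
-- without a non-airline tweet both before and after it.
def vcKeep (conversation : List Int) (airline_tweet_ids : List Int) : List Bool :=
  (PySem.List.enumerate conversation 0).map (fun p =>
    if p.2 ∈ airline_tweet_ids then
      ((PySem.List.pyRange (p.1 - 1) (-1) (-1)).any
          (fun j => !decide (PySem.List.pyGetD conversation j 0 ∈ airline_tweet_ids))) &&
      ((PySem.List.pyRange (p.1 + 1) (PySem.List.len conversation) 1).any
          (fun j => !decide (PySem.List.pyGetD conversation j 0 ∈ airline_tweet_ids)))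
    else true)

-- [tid for i, tid in enumerate(conversation) if keep[i]]  (i is always in range for
-- keep, so pyGetD with a default is exact here)
def vcFiltered (conversation : List Int) (airline_tweet_ids : List Int) : List Int :=
  ((PySem.List.enumerate conversation 0).filter
      (fun p => PySem.List.pyGetD (vcKeep conversation airline_tweet_ids) p.1 false)).map
    (fun p => p.2)

-- termination helpers for the recursion in A (cited by the port's decreasing_by):
lemma length_vcKeep (c a : List Int) : (vcKeep c a).length = c.length := by
  simp [vcKeep]

lemma vcFiltered_length_lt (cv a : List Int)
    (h : (vcKeep cv a).any (fun b => !b) = true) :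
    (vcFiltered cv a).length < cv.length := by
  rw [vcFiltered, List.length_map]
  have hlt : ((PySem.List.enumerate cv 0).filter
      (fun p => PySem.List.pyGetD (vcKeep cv a) p.1 false)).length
      < (PySem.List.enumerate cv 0).length := by
    obtain ⟨b, hb, hbf⟩ := List.any_eq_true.mp h
    obtain ⟨k, hk, rfl⟩ := List.mem_iff_getElem.mp hb
    have hk' : k < cv.length := by rw [← length_vcKeep cv a]; exact hk
    apply List.length_filter_lt_length_iff_exists.mpr
    refine ⟨(0 + (k : Int), cv[k]), ?_, ?_⟩
    · exact (PySem.List.mem_enumerate_iff _ _ _).mpr ⟨k, hk', rfl⟩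
    · simp only [zero_add, PySem.List.pyGetD_natCast]
      rw [List.getD_eq_getElem _ _ hk]
      simpa using hbf
  calc _ < (PySem.List.enumerate cv 0).length := hlt
    _ = cv.length := by simp

def valid_conversation (conversation : List Int) (airline_tweet_ids : List Int) : Option (List Int) :=
  if !((vcFiltered conversation airline_tweet_ids).any
        (fun tid => decide (tid ∈ airline_tweet_ids))) then none
  else if _h : (vcKeep conversation airline_tweet_ids).any (fun b => !b) then
    valid_conversation (vcFiltered conversation airline_tweet_ids) airline_tweet_ids
  else some (vcFiltered conversation airline_tweet_ids)
termination_by conversation.length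
decreasing_by exact vcFiltered_length_lt _ _ _h

-- ===== PORT B =====
def valid_conversation_alt (conversation : List Int) (airline_tweet_ids : List Int) : Option (List Int) :=
  let air := PySem.Set.ofList airline_tweet_ids
  let non := ((PySem.List.enumerate conversation 0).filter
      (fun p => !(PySem.Set.contains air p.2))).map (fun p => p.1)
  if non.isEmpty then none
  else
    let first := PySem.List.pyGetD non 0 0
    let last := PySem.List.pyGetD non (-1) 0
    let out := ((PySem.List.enumerate conversation 0).filter
        (fun p => !(PySem.Set.contains air p.2) ||
          (decide (first < p.1) && decide (p.1 < last)))).map (fun p => p.2)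
    if !(out.any (fun t => PySem.Set.contains air t)) then none
    else some out

-- ===== PRECONDITION & SPEC =====
def Spec_valid_conversation (conversation : List Int) (airline_tweet_ids : List Int) (out : Option (List Int)) : Prop := out = valid_conversation_alt conversation airline_tweet_ids
instance (conversation : List Int) (airline_tweet_ids : List Int) (out : Option (List Int)) : Decidable (Spec_valid_conversation conversation airline_tweet_ids out) := by unfold Spec_valid_conversation; infer_instance

-- ===== CLAIM (what is proved, stated in full; the proofs are below) =====
def Claim_equal_valid_conversation : Prop := ∀ (conversation : List Int) (airline_tweet_ids : List Int), Dom_valid_conversation conversation airline_tweet_ids → Spec_valid_conversation conversation airline_tweet_ids (valid_conversation conversation airline_tweet_ids)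

-- ===== LEMMAS AND PROOFS =====

-- `t` is a non-airline tweet
def na (air : List Int) (t : Int) : Bool := !decide (t ∈ air)

def Fgo (air : List Int) (pre : Bool) : List Int → List Int
  | [] => []
  | t :: rest =>
    if na air t then t :: Fgo air true rest
    else if pre && rest.any (na air) then t :: Fgo air pre rest
    else Fgo air pre rest

def condIdx (conv air : List Int) (pre : Bool) (i : Nat) : Bool :=
  na air (conv.getD i 0) ||
    ((pre || (conv.take i).any (na air)) && (conv.drop (i + 1)).any (na air))

lemma enumerate_eq_map_range (c : List Int) (s : Int) :
    PySem.List.enumerate c s = (List.range c.length).map (fun (k : Nat) => (s + (k : Int), c.getD k 0)) := by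
  induction c generalizing s with
  | nil => rfl
  | cons t rest ih =>
    rw [PySem.List.enumerate_cons, ih, List.length_cons, List.range_succ_eq_map]
    simp [List.map_map, Function.comp_def]
    intro k _
    ring

lemma condIdx_succ (t : Int) (rest air : List Int) (pre : Bool) (i : Nat) :
    condIdx (t :: rest) air pre (i + 1) = condIdx rest air (pre || na air t) i := by
  simp [condIdx, Bool.or_assoc]

lemma filter_range_eq_Fgo (air c : List Int) (pre : Bool) :
    ((List.range c.length).filter (condIdx c air pre)).map (fun i => c.getD i 0) =
      Fgo air pre c := by
  induction c generalizing pre with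
  | nil => rfl
  | cons t rest ih =>
    rw [List.length_cons, List.range_succ_eq_map, List.filter_cons]
    have h0 : condIdx (t :: rest) air pre 0 = (na air t || (pre && rest.any (na air))) := by
      simp [condIdx]
    have hmapf : (List.map Nat.succ (List.range rest.length)).filter (condIdx (t :: rest) air pre)
        = ((List.range rest.length).filter (condIdx rest air (pre || na air t))).map Nat.succ := by
      rw [List.filter_map]
      congr 1
      apply List.filter_congr
      intro i _
      exact condIdx_succ t rest air pre i
    by_cases ht : na air t = true
    · simp only [h0, ht, Bool.true_or, if_pos]
      rw [List.map_cons, hmapf, List.map_map]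
      simp only [ht, Bool.or_true]
      rw [show ((fun i => (t :: rest).getD i 0) ∘ Nat.succ) = (fun i => rest.getD i 0) from rfl]
      rw [ih]
      simp [Fgo, ht]
    · simp only [Bool.not_eq_true] at ht
      simp only [h0, ht, Bool.false_or]
      rw [hmapf]
      by_cases hk : (pre && rest.any (na air)) = true
      · simp only [hk, if_pos, List.map_cons, List.map_map]
        rw [show ((fun i => (t :: rest).getD i 0) ∘ Nat.succ) = (fun i => rest.getD i 0) from rfl]
        rw [ih]
        simp [Fgo, ht, hk, Bool.or_false]
      · simp only [hk, Bool.false_eq_true, if_false, List.map_map]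
        rw [show ((fun i => (t :: rest).getD i 0) ∘ Nat.succ) = (fun i => rest.getD i 0) from rfl]
        rw [ih]
        simp only [Bool.not_eq_true] at hk
        simp [Fgo, ht, hk, Bool.or_false]

lemma any_range_getD (c : List Int) (f : Int → Bool) (k : Nat) (hk : k ≤ c.length) :
    (List.range k).any (fun j => f (c.getD j 0)) = (c.take k).any f := by
  induction k with
  | zero => rfl
  | succ k ih =>
    have hk' : k < c.length := hk
    rw [List.range_succ, List.any_append, List.take_add_one, List.any_append,
      ih (Nat.le_of_lt hk')]
    simp [List.getElem?_eq_getElem hk']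

lemma hb_eq (c a : List Int) (k : Nat) (hk : k ≤ c.length) :
    ((PySem.List.pyRange ((k : Int) - 1) (-1) (-1)).any
        (fun j => !decide (PySem.List.pyGetD c j 0 ∈ a))) = (c.take k).any (na a) := by
  have h1 : PySem.List.pyRange ((k : Int) - 1) (-1) (-1)
      = (PySem.List.pyRange 0 (k : Int) 1).reverse := by
    rw [PySem.List.pyRange_neg_one_eq_reverse]; norm_num
  rw [h1, List.any_reverse, PySem.List.pyRange_zero_natCast, List.any_map]
  rw [← any_range_getD c (na a) k hk]
  simp [na, Function.comp_def, List.getD]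
  rfl

lemma ha_eq (c a : List Int) (k : Nat) :
    ((PySem.List.pyRange ((k : Int) + 1) ((c.length : Int)) 1).any
        (fun j => !decide (PySem.List.pyGetD c j 0 ∈ a))) = (c.drop (k + 1)).any (na a) := by
  have h1 := PySem.List.map_pyGetD_pyRange' (xs := c) (a := (k : Int) + 1) (d := 0)
    (by positivity)
  rw [show List.drop (k + 1) c
      = List.map (fun j => PySem.List.pyGetD c j 0)
          (PySem.List.pyRange ((k : Int) + 1) ((c.length : Int)) 1) from by
    rw [h1]; norm_num]
  rw [List.any_map]
  simp [na, Function.comp_def]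

lemma vcKeep_getElem (cv a : List Int) (k : Nat) (hk : k < cv.length) :
    (vcKeep cv a)[k]'(by rw [length_vcKeep]; exact hk) = condIdx cv a false k := by
  simp only [vcKeep, List.getElem_map, PySem.List.getElem_enumerate, zero_add,
    PySem.List.len_eq]
  have hgd : cv.getD k 0 = cv[k] := List.getD_eq_getElem cv 0 hk
  unfold condIdx
  rw [hgd]
  by_cases hm : cv[k] ∈ a
  · rw [if_pos hm, hb_eq cv a k hk.le, ha_eq cv a k]
    simp [na, hm]
  · rw [if_neg hm]
    simp [na, hm]

lemma vcFiltered_eq_Fgo (cv a : List Int) : vcFiltered cv a = Fgo a false cv := by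
  rw [← filter_range_eq_Fgo, vcFiltered, enumerate_eq_map_range, List.filter_map,
    List.map_map]
  have : ∀ k ∈ List.range cv.length,
      ((fun p => PySem.List.pyGetD (vcKeep cv a) p.1 false) ∘
        (fun (k : Nat) => ((0 : Int) + (k : Int), cv.getD k 0))) k = condIdx cv a false k := by
    intro k hk
    have hk' : k < cv.length := List.mem_range.mp hk
    simp only [Function.comp_def, zero_add, PySem.List.pyGetD_natCast]
    rw [List.getD_eq_getElem _ _ (by rw [length_vcKeep]; exact hk')]
    exact vcKeep_getElem cv a k hk'
  rw [List.filter_congr this]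
  rfl

lemma Fgo_any_na (a : List Int) (pre : Bool) (c : List Int) :
    (Fgo a pre c).any (na a) = c.any (na a) := by
  induction c generalizing pre with
  | nil => rfl
  | cons t rest ih =>
    by_cases ht : na a t = true
    · simp [Fgo, ht, ih]
    · simp only [Bool.not_eq_true] at ht
      by_cases hk : (pre && rest.any (na a)) = true
      · simp [Fgo, ht, hk, ih]
      · simp [Fgo, ht, hk, ih]

lemma Fgo_true_idem (a c : List Int) : Fgo a true (Fgo a true c) = Fgo a true c := by
  induction c with
  | nil => rfl
  | cons t rest ih =>
    by_cases ht : na a t = true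
    · simp [Fgo, ht, ih]
    · simp only [Bool.not_eq_true] at ht
      by_cases hk : rest.any (na a) = true
      · simp [Fgo, ht, hk, Fgo_any_na, ih]
      · simp [Fgo, ht, hk, ih]

lemma Fgo_false_idem (a c : List Int) : Fgo a false (Fgo a false c) = Fgo a false c := by
  induction c with
  | nil => rfl
  | cons t rest ih =>
    by_cases ht : na a t = true
    · simp [Fgo, ht, Fgo_true_idem]
    · simp only [Bool.not_eq_true] at ht
      simp [Fgo, ht, ih]

lemma Fgo_nil_of_all_air (a : List Int) (pre : Bool) (cv : List Int)
    (h : cv.any (na a) = false) : Fgo a pre cv = [] := by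
  induction cv generalizing pre with
  | nil => rfl
  | cons t rest ih =>
    simp only [List.any_cons, Bool.or_eq_false_iff] at h
    simp [Fgo, h.1, h.2, ih _ h.2]

lemma set_contains_eq (a : List Int) (x : Int) :
    PySem.Set.contains (PySem.Set.ofList a) x = decide (x ∈ a) := by
  by_cases h : x ∈ a <;>
    simp [PySem.Set.mem_ofList, h]

lemma head_le_of_pairwise_lt {α : Type} [Preorder α] {l : List α} (hp : l.Pairwise (· < ·)) (hne : l ≠ [])
    (x : α) (hx : x ∈ l) : l.head hne ≤ x := by
  cases l with
  | nil => exact absurd rfl hne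
  | cons y ys =>
    rcases List.mem_cons.mp hx with h | h
    · simp [h]
    · exact le_of_lt ((List.rel_of_pairwise_cons hp) h)

lemma head_ge_of_pairwise_gt {α : Type} [Preorder α] {l : List α} (hp : l.Pairwise (· > ·)) (hne : l ≠ [])
    (x : α) (hx : x ∈ l) : x ≤ l.head hne := by
  cases l with
  | nil => exact absurd rfl hne
  | cons y ys =>
    rcases List.mem_cons.mp hx with h | h
    · simp [h]
    · exact le_of_lt ((List.rel_of_pairwise_cons hp) h)

lemma le_getLast_of_pairwise_lt {α : Type} [Preorder α] {l : List α} (hp : l.Pairwise (· < ·)) (hne : l ≠ [])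
    (x : α) (hx : x ∈ l) : x ≤ l.getLast hne := by
  rw [List.getLast_eq_head_reverse]
  exact head_ge_of_pairwise_gt (List.pairwise_reverse.mpr hp) _ x (List.mem_reverse.mpr hx)

def natNon (cv a : List Int) : List Nat :=
  (List.range cv.length).filter (fun k => na a (cv.getD k 0))

lemma pairwise_natNon (cv a : List Int) : (natNon cv a).Pairwise (· < ·) :=
  (List.pairwise_lt_range).filter _

lemma take_any_iff (cv a : List Int) (k : Nat) (hk : k ≤ cv.length) :
    (cv.take k).any (na a) = true ↔ ∃ j ∈ natNon cv a, j < k := by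
  rw [← any_range_getD cv (na a) k hk]
  simp only [List.any_eq_true, natNon, List.mem_filter, List.mem_range]
  constructor
  · rintro ⟨j, hj, hna⟩
    exact ⟨j, ⟨lt_of_lt_of_le hj hk, hna⟩, hj⟩
  · rintro ⟨j, ⟨_, hna⟩, hj⟩
    exact ⟨j, hj, hna⟩

lemma drop_any_iff (cv a : List Int) (k : Nat) :
    (cv.drop (k + 1)).any (na a) = true ↔ ∃ j ∈ natNon cv a, k < j := by
  simp only [List.any_eq_true, natNon, List.mem_filter, List.mem_range]
  constructor
  · rintro ⟨x, hx, hna⟩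
    obtain ⟨i, hi, heq⟩ := List.mem_drop_iff_getElem.mp hx
    refine ⟨k + 1 + i, ⟨by omega, ?_⟩, by omega⟩
    rw [List.getD_eq_getElem cv 0 (by omega), heq]
    exact hna
  · rintro ⟨j, ⟨hj, hna⟩, hk⟩
    refine ⟨cv.getD j 0, ?_, hna⟩
    rw [List.mem_drop_iff_getElem]
    refine ⟨j - (k + 1), by omega, ?_⟩
    rw [List.getD_eq_getElem cv 0 hj]
    congr 1
    omega

def Bspec (cv a : List Int) : Option (List Int) :=
  if (Fgo a false cv).any (fun t => decide (t ∈ a)) then some (Fgo a false cv) else none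

lemma non_eq (cv a : List Int) :
    ((PySem.List.enumerate cv 0).filter
        (fun p => !(PySem.Set.contains (PySem.Set.ofList a) p.2))).map (fun p => p.1)
      = (natNon cv a).map (fun (k : Nat) => (k : Int)) := by
  rw [enumerate_eq_map_range cv 0, List.filter_map, List.map_map]
  simp only [Function.comp_def, zero_add, set_contains_eq, natNon]
  rfl

lemma any_na_false_of_natNon_nil (cv a : List Int) (hne : natNon cv a = []) :
    cv.any (na a) = false := by
  rw [List.any_eq_false]
  intro x hx
  obtain ⟨i, hi, rfl⟩ := List.mem_iff_getElem.mp hx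
  intro hna
  have : i ∈ natNon cv a := by
    rw [natNon, List.mem_filter]
    exact ⟨List.mem_range.mpr hi, by rw [List.getD_eq_getElem cv 0 hi]; exact hna⟩
  simp [hne] at this

lemma cond_first (cv a : List Int) (hne : natNon cv a ≠ []) (k : Nat) (hk : k < cv.length) :
    decide ((((natNon cv a).head hne : Nat) : Int) < (k : Int)) = (cv.take k).any (na a) := by
  rw [Bool.eq_iff_iff, decide_eq_true_eq, take_any_iff cv a k hk.le]
  constructor
  · intro h
    exact ⟨(natNon cv a).head hne, List.head_mem hne, by exact_mod_cast h⟩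
  · rintro ⟨j, hj, hjk⟩
    have := head_le_of_pairwise_lt (pairwise_natNon cv a) hne j hj
    have : (natNon cv a).head hne < k := lt_of_le_of_lt this hjk
    exact_mod_cast this

lemma cond_last (cv a : List Int) (hne : natNon cv a ≠ []) (k : Nat) :
    decide ((k : Int) < (((natNon cv a).getLast hne : Nat) : Int)) = (cv.drop (k + 1)).any (na a) := by
  rw [Bool.eq_iff_iff, decide_eq_true_eq, drop_any_iff cv a k]
  constructor
  · intro h
    exact ⟨(natNon cv a).getLast hne, List.getLast_mem hne, by exact_mod_cast h⟩
  · rintro ⟨j, hj, hjk⟩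
    have := le_getLast_of_pairwise_lt (pairwise_natNon cv a) hne j hj
    have : k < (natNon cv a).getLast hne := lt_of_lt_of_le hjk this
    exact_mod_cast this

lemma alt_eq_Bspec (cv a : List Int) : valid_conversation_alt cv a = Bspec cv a := by
  simp only [valid_conversation_alt]
  rw [non_eq cv a]
  by_cases hne : natNon cv a = []
  · rw [if_pos (by simp [hne])]
    rw [Bspec, Fgo_nil_of_all_air a false cv (any_na_false_of_natNon_nil cv a hne)]
    simp
  · rw [if_neg (by simp [hne])]
    have hmapne : (natNon cv a).map (fun (k : Nat) => (k : Int)) ≠ [] := by simp [hne]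
    have hfirst : PySem.List.pyGetD ((natNon cv a).map (fun (k : Nat) => (k : Int))) 0 0
        = (((natNon cv a).head hne : Nat) : Int) := by
      obtain ⟨y, ys, h⟩ := List.exists_cons_of_ne_nil hne
      simp [h, PySem.List.pyGetD_zero]
    have hlast : PySem.List.pyGetD ((natNon cv a).map (fun (k : Nat) => (k : Int))) (-1) 0
        = (((natNon cv a).getLast hne : Nat) : Int) := by
      rw [PySem.List.pyGetD_neg_one _ 0 hmapne, List.getLast_map]
    rw [hfirst, hlast]
    have hout : ((PySem.List.enumerate cv 0).filter
        (fun p => !(PySem.Set.contains (PySem.Set.ofList a) p.2) ||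
          (decide ((((natNon cv a).head hne : Nat) : Int) < p.1) &&
           decide (p.1 < (((natNon cv a).getLast hne : Nat) : Int))))).map (fun p => p.2)
        = Fgo a false cv := by
      rw [enumerate_eq_map_range cv 0, List.filter_map, List.map_map]
      rw [List.filter_congr (q := condIdx cv a false) ?_]
      · rw [show ((fun (p : Int × Int) => p.2) ∘ (fun (k : Nat) => ((0 : Int) + (k : Int), cv.getD k 0)))
            = (fun (k : Nat) => cv.getD k 0) from rfl]
        exact filter_range_eq_Fgo a cv false
      · intro k hk
        have hk' : k < cv.length := List.mem_range.mp hk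
        simp only [Function.comp_def, zero_add, set_contains_eq]
        rw [cond_first cv a hne k hk', cond_last cv a hne k]
        rw [condIdx, Bool.false_or]
        rw [List.getD_eq_getElem cv 0 hk']
        rfl
    rw [hout]
    simp only [set_contains_eq]
    rw [Bspec]
    by_cases hany : (Fgo a false cv).any (fun t => decide (t ∈ a)) = true
    · simp [hany]
    · simp only [Bool.not_eq_true] at hany
      simp [hany]

lemma vcFiltered_eq_self_of_not_changed (cv a : List Int)
    (h : (vcKeep cv a).any (fun b => !b) = false) : vcFiltered cv a = cv := by
  rw [vcFiltered]
  have hall : ∀ p ∈ PySem.List.enumerate cv 0,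
      PySem.List.pyGetD (vcKeep cv a) p.1 false = true := by
    intro p hp
    obtain ⟨k, hk, rfl⟩ := (PySem.List.mem_enumerate_iff _ _ _).mp hp
    simp only [zero_add, PySem.List.pyGetD_natCast]
    rw [List.getD_eq_getElem _ _ (by rw [length_vcKeep]; exact hk)]
    have := (List.any_eq_false.mp h) ((vcKeep cv a)[k]'(by rw [length_vcKeep]; exact hk))
      (List.getElem_mem _)
    simpa using this
  rw [List.filter_eq_self.mpr hall, PySem.List.map_snd_enumerate]

lemma a_eq_Bspec (cv a : List Int) : valid_conversation cv a = Bspec cv a := by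
  induction hn : cv.length using Nat.strong_induction_on generalizing cv with
  | _ n ih =>
  subst hn
  rw [valid_conversation]
  by_cases hany : (vcFiltered cv a).any (fun tid => decide (tid ∈ a)) = true
  · rw [if_neg (by simp [hany])]
    by_cases hch : (vcKeep cv a).any (fun b => !b) = true
    · rw [dif_pos hch]
      rw [ih (vcFiltered cv a).length (vcFiltered_length_lt cv a hch) _ rfl]
      rw [Bspec, Bspec, vcFiltered_eq_Fgo, Fgo_false_idem]
    · simp only [Bool.not_eq_true] at hch
      rw [dif_neg (by simp [hch])]
      have hself := vcFiltered_eq_self_of_not_changed cv a hch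
      rw [hself] at hany ⊢
      rw [Bspec, ← vcFiltered_eq_Fgo, hself, hany]
      simp
  · simp only [Bool.not_eq_true] at hany
    rw [if_pos (by simp [hany])]
    rw [Bspec, ← vcFiltered_eq_Fgo, hany]
    simp


-- ===== VERDICT (by name: the statement is the Claim_ definition above) =====
theorem valid_conversation_spec : Claim_equal_valid_conversation := by
  intro conversation airline_tweet_ids _
  unfold Spec_valid_conversation
  rw [a_eq_Bspec, alt_eq_Bspec]
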